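-- pv_equiv track=rewrite | github.com/dragon198466ani/Safescoring.io | scripts/generate_user_friendly_analyses.py | get_main_issues
-- ===== SOURCE A (Python) =====
-- def get_main_issues(evals, limit=3):
--     """Get main issues in simple language."""
--     failures = [e for e in evals if e['result'] == 'NO']
--     # Prioritize essential failures
--     failures.sort(key=lambda x: (not x.get('is_essential', False)))
--
--     issues = []
--     for f in failures[:limit]:
--         # Simplify the issue description
--         title = f.get('title', '')
--         why = f.get('why', '')
--
--         # Create simple issue description
--         if why and len(why) > 20:
--             # Extract the key point from the justification
--             simple_why = why[:150].split('.')[0]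
--             issues.append(f"{title}: {simple_why}")
--         else:
--             issues.append(f"Missing: {title}")
--
--     return issues
-- ===== SOURCE B (Python) =====
-- def _describe(f):
--     title = f.get('title', '')
--     why = f.get('why', '')
--     if why and len(why) > 20:
--         return f"{title}: {why[:150].split('.')[0]}"
--     return f"Missing: {title}"
--
--
-- def get_main_issues(evals, limit=3):
--     """Get main issues in simple language."""
--     essential = []
--     other = []
--     for e in evals:
--         if e['result'] == 'NO':
--             (essential if e.get('is_essential', False) else other).append(e)
--     return [_describe(f) for f in (essential + other)[:limit]]
-- ===== Notes on version B (the rewrite author's own statement) =====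
-- stated objective: simpler
-- what changed: Replaces the filter-then-stable-sort-by-boolean-key with a single linear pass that partitions the 'NO' entries into essential/other buckets and concatenates them, moving the per-entry formatting into a small helper.
-- outside the precondition, e.g. on get_main_issues([{'title': 't'}], 3): A raises KeyError, B raises KeyError
import Mathlib
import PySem

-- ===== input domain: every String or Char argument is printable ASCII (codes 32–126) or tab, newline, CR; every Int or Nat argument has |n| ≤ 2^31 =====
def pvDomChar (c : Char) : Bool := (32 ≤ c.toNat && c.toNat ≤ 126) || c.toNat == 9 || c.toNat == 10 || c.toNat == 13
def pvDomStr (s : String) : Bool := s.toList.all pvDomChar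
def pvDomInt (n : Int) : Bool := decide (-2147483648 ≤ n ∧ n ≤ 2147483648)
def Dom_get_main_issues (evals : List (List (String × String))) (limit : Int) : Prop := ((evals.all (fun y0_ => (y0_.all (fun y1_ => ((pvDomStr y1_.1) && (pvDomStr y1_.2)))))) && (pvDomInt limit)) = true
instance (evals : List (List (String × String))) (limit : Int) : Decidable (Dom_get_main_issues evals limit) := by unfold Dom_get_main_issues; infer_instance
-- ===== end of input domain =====

-- B replaces A's filter-then-stable-sort with a single partitioning pass into essential/other buckets (simpler; same return value).

-- ===== PORT A =====
-- e['result'] == 'NO'  (first-match lookup; a missing 'result' key is a KeyError in Python → excluded by Pre_)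
def pvIsNo (e : List (String × String)) : Bool := (PySem.Dict.mk e).get? "result" == some "NO"
-- truthiness of e.get('is_essential', False): key present with a non-empty string value
def pvEss (e : List (String × String)) : Bool := (PySem.Dict.mk e).getD "is_essential" "" != ""

def get_main_issues (evals : List (List (String × String))) (limit : Int) : List String :=
  let failures := evals.foldl (fun acc e => if pvIsNo e then acc ++ [e] else acc) ([] : List (List (String × String)))
  let failures := PySem.List.sorted failures (fun x => !pvEss x) false
  (PySem.List.slice failures none (some limit)).foldl
    (fun issues f =>
      let title := (PySem.Dict.mk f).getD "title" ""
      let why := (PySem.Dict.mk f).getD "why" ""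
      if why != "" && PySem.Str.len why > 20 then
        -- why[:150].split('.')[0]: '.' ≠ '' so split? is some; the split list is never empty, so [0] is exact
        let simple_why := PySem.List.pyGetD ((PySem.Str.split? (PySem.Str.slice why none (some 150)) ".").getD []) 0 ""
        issues ++ [title ++ ": " ++ simple_why]
      else
        issues ++ ["Missing: " ++ title]) []

-- ===== PORT B =====
def pvDescribe (f : List (String × String)) : String :=
  let title := (PySem.Dict.mk f).getD "title" ""
  let why := (PySem.Dict.mk f).getD "why" ""
  if why != "" && PySem.Str.len why > 20 then
    title ++ ": " ++ PySem.List.pyGetD ((PySem.Str.split? (PySem.Str.slice why none (some 150)) ".").getD []) 0 ""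
  else
    "Missing: " ++ title

def get_main_issues_alt (evals : List (List (String × String))) (limit : Int) : List String :=
  let p := evals.foldl
    (fun (acc : List (List (String × String)) × List (List (String × String))) e =>
      if pvIsNo e then
        if pvEss e then (acc.1 ++ [e], acc.2) else (acc.1, acc.2 ++ [e])
      else acc)
    ([], [])
  (PySem.List.slice (p.1 ++ p.2) none (some limit)).map pvDescribe

-- ===== PRECONDITION & SPEC =====
-- Pre_ excludes evals containing a dict without the key 'result': there A (and B) raise KeyError.
def Pre_get_main_issues (evals : List (List (String × String))) (limit : Int) : Prop :=
  ∀ e ∈ evals, (PySem.Dict.mk e).contains "result" = true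
instance (evals : List (List (String × String))) (limit : Int) : Decidable (Pre_get_main_issues evals limit) := by unfold Pre_get_main_issues; infer_instance

def pvWitness_get_main_issues : (List (List (String × String))) × Int :=
  ([[("result", "NO"), ("title", "Privacy policy"), ("why", "short")], [("result", "YES")]], 3)

def Spec_get_main_issues (evals : List (List (String × String))) (limit : Int) (out : List String) : Prop := out = get_main_issues_alt evals limit
instance (evals : List (List (String × String))) (limit : Int) (out : List String) : Decidable (Spec_get_main_issues evals limit out) := by unfold Spec_get_main_issues; infer_instance

-- ===== CLAIM (what is proved, stated in full; the proofs are below) =====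
def Claim_equal_get_main_issues : Prop := ∀ (evals : List (List (String × String))) (limit : Int), Dom_get_main_issues evals limit → Pre_get_main_issues evals limit → Spec_get_main_issues evals limit (get_main_issues evals limit)

-- ===== LEMMAS AND PROOFS =====

-- insertBy puts x right between a false-prefix and a true-suffix of 'before x ·'
theorem pv_insertBy_append {α : Type} (before : α → α → Bool) (x : α) (F T : List α)
    (hF : ∀ y ∈ F, before x y = false) (hT : ∀ y ∈ T, before x y = true) :
    PySem.List.insertBy before x (F ++ T) = F ++ x :: T := by
  induction F with
  | nil =>
    cases T with
    | nil => rfl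
    | cons t ts =>
      simp only [List.nil_append]
      unfold PySem.List.insertBy
      simp [hT t (by simp)]
  | cons f fs ih =>
    have hbf := hF f (by simp)
    simp only [List.cons_append]
    unfold PySem.List.insertBy
    simp only [hbf, Bool.false_eq_true, if_false]
    have := ih (fun y hy => hF y (by simp [hy]))
    simp only [List.cons.injEq, true_and]
    exact this

-- stable sort by a boolean key is exactly the partition
theorem pv_sorted_bool {α : Type} (xs : List α) (k : α → Bool) :
    PySem.List.sorted xs (fun x => !k x) false =
      xs.filter k ++ xs.filter (fun x => !k x) := by
  rw [PySem.List.sorted_eq_foldl_insertBy]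
  suffices h : ∀ (F T : List α), (∀ y ∈ F, k y = true) → (∀ y ∈ T, k y = false) →
      xs.foldl (fun acc x => PySem.List.insertBy (fun a b => decide ((!k a) < (!k b))) x acc) (F ++ T)
      = (F ++ xs.filter k) ++ (T ++ xs.filter (fun x => !k x)) by
    have := h [] [] (by simp) (by simp)
    simpa using this
  induction xs with
  | nil => intro F T _ _; simp
  | cons x xs ih =>
    intro F T hF hT
    simp only [List.foldl_cons]
    by_cases hk : k x = true
    · have : PySem.List.insertBy (fun a b => decide ((!k a) < (!k b))) x (F ++ T) = (F ++ [x]) ++ T := by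
        rw [pv_insertBy_append]
        · simp
        · intro y hy; simp [hk, hF y hy]
        · intro y hy; simp [hk, hT y hy]
      rw [this, ih (F ++ [x]) T (by intro y hy; rcases List.mem_append.1 hy with h | h; exact hF y h; simp at h; subst h; exact hk) hT]
      simp [hk]
    · have hk' : k x = false := by simpa using hk
      have : PySem.List.insertBy (fun a b => decide ((!k a) < (!k b))) x (F ++ T) = (F ++ T) ++ [x] := by
        apply PySem.List.insertBy_of_forall_not_before
        intro y hy
        rcases List.mem_append.1 hy with h | h
        · simp [hk', hF y h]
        · simp [hk', hT y h]
      rw [List.append_assoc] at this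
      rw [this, ih F (T ++ [x]) hF (by intro y hy; rcases List.mem_append.1 hy with h | h; exact hT y h; simp at h; subst h; exact hk')]
      simp [hk']
-- B's partitioning fold is two filters
theorem pv_partition_fold (evals : List (List (String × String)))
    (a b : List (List (String × String))) :
    evals.foldl
      (fun (acc : List (List (String × String)) × List (List (String × String))) e =>
        if pvIsNo e then
          if pvEss e then (acc.1 ++ [e], acc.2) else (acc.1, acc.2 ++ [e])
        else acc) (a, b)
    = (a ++ evals.filter (fun e => pvIsNo e && pvEss e),
       b ++ evals.filter (fun e => pvIsNo e && !pvEss e)) := by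
  induction evals generalizing a b with
  | nil => simp
  | cons e es ih =>
    simp only [List.foldl_cons, List.filter_cons]
    by_cases h1 : pvIsNo e
    · by_cases h2 : pvEss e
      · simp [h1, h2, ih]
      · simp [h1, h2, ih]
    · simp [h1, ih]

-- ===== VERDICT (by name: the statement is the Claim_ definition above) =====
theorem get_main_issues_spec : Claim_equal_get_main_issues := by
  intro evals limit _ _
  unfold Spec_get_main_issues get_main_issues get_main_issues_alt
  rw [pv_partition_fold]
  simp only [List.nil_append]
  rw [PySem.List.foldl_append_if_eq_filter, List.nil_append]
  rw [pv_sorted_bool (evals.filter pvIsNo) pvEss]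
  rw [List.filter_filter, List.filter_filter]
  have hstep : (fun (issues : List String) (f : List (String × String)) =>
      let title := (PySem.Dict.mk f).getD "title" ""
      let why := (PySem.Dict.mk f).getD "why" ""
      if why != "" && PySem.Str.len why > 20 then
        let simple_why := PySem.List.pyGetD ((PySem.Str.split? (PySem.Str.slice why none (some 150)) ".").getD []) 0 ""
        issues ++ [title ++ ": " ++ simple_why]
      else
        issues ++ ["Missing: " ++ title])
      = (fun issues f => issues ++ [pvDescribe f]) := by
    funext issues f
    simp only [pvDescribe]
    rw [apply_ite (fun s : String => issues ++ [s])]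
  rw [hstep, PySem.List.foldl_append_singleton_eq_map, List.nil_append]
  congr 2
  simp [Bool.and_comm]
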